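-- pv_equiv track=rewrite | github.com/clinton180/Analyzing-SAT-solvers-with-Geometric-Resolution | Comp_499A/SAT/sat_gap.py | normalize_grouping
-- ===== SOURCE A (Python) =====
-- from typing import List, Optional, Sequence, Tuple
--
-- def normalize_grouping(grouping: Sequence[int], n: int) -> List[int]:
--     """
--       - grouping is a list of positive ints (bit-widths)
--       - if sum < n: append remainder as extra dimension
--       - if sum > n: reduce/remove from the end until sum == n
--     """
--     g = [int(x) for x in grouping if int(x) > 0]
--     s = sum(g)
--
--     if s < n:
--         g.append(n - s)
--         return g
--
--     if s > n:
--         excess = s - n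
--         i = len(g) - 1
--         while excess > 0 and i >= 0:
--             take = min(g[i], excess)
--             g[i] -= take
--             excess -= take
--             if g[i] == 0:
--                 g.pop(i)
--             i -= 1
--         if sum(g) != n:
--             raise ValueError("Failed to normalize grouping to sum to n.")
--         return g
--
--     return g
-- ===== SOURCE B (Python) =====
-- from typing import List, Sequence
--
-- def normalize_grouping(grouping: Sequence[int], n: int) -> List[int]:
--     g = [int(x) for x in grouping if int(x) > 0]
--     s = sum(g)
--     if s < n:
--         return g + [n - s]
--     if s == n:
--         return g
--     out: List[int] = []
--     acc = 0
--     for x in g: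
--         if acc >= n:
--             break
--         if x <= n - acc:
--             out.append(x)
--             acc += x
--         else:
--             out.append(n - acc)
--             acc = n
--             break
--     if acc != n:
--         raise ValueError("Failed to normalize grouping to sum to n.")
--     return out
-- ===== Notes on version B (the rewrite author's own statement) =====
-- stated objective: alternative
-- what changed: For the over-sum case, B builds the result in one forward pass with a running accumulator (append whole or trimmed boundary element, then stop) instead of A's backward destructive loop that subtracts from and pops tail elements in place.
import Mathlib
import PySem

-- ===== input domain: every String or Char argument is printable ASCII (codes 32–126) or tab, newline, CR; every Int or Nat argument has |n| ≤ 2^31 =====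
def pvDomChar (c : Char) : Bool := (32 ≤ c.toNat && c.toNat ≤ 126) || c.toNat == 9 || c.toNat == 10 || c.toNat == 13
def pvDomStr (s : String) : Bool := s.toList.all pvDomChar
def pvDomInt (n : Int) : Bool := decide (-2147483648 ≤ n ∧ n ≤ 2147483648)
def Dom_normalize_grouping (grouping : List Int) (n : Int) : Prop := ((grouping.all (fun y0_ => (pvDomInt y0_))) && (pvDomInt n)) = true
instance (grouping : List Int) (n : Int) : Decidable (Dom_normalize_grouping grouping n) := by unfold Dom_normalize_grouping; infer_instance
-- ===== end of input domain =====

-- B replaces A's backward destructive trim loop (subtract/pop from the tail) by a single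
-- forward constructive pass with a running accumulator; same results, similar cost (objective: alternative).


-- ===== PORT A =====
-- A's while loop: fuel k = i+1 (i runs from len-1 down to -1, decreasing by 1 each pass).
-- g[i] is always in range inside the loop, so getD's default 0 is never used.
def loopA : List Int → Int → Nat → List Int
  | g, _, 0 => g
  | g, excess, k+1 =>
    if excess > 0 then
      let v := g.getD k 0
      let take := min v excess
      let g' := g.set k (v - take)
      if v - take = 0 then loopA (g'.eraseIdx k) (excess - take) k
      else loopA g' (excess - take) k
    else g

def normalize_grouping (grouping : List Int) (n : Int) : List Int :=
  let g := grouping.filter (fun x => decide (0 < x))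
  let s := g.sum
  if s < n then g ++ [n - s]
  else if s > n then
    let g' := loopA g (s - n) g.length
    if g'.sum ≠ n then []   -- 'raise ValueError' in A: unreachable under Pre_ (0 ≤ n)
    else g'
  else g

-- ===== PORT B =====
-- Source B's for loop over g with accumulators out/acc, as an accumulating recursion.
def loopB : List Int → Int → Int → List Int × Int
  | [], acc, _ => ([], acc)
  | x :: rest, acc, n =>
    if acc ≥ n then ([], acc)
    else if x ≤ n - acc then
      let r := loopB rest (acc + x) n
      (x :: r.1, r.2)
    else ([n - acc], n)

def normalize_grouping_alt (grouping : List Int) (n : Int) : List Int :=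
  let g := grouping.filter (fun x => decide (0 < x))
  let s := g.sum
  if s < n then g ++ [n - s]
  else if s = n then g
  else
    let r := loopB g 0 n
    if r.2 ≠ n then []   -- 'raise ValueError' in Source B: unreachable under Pre_ (0 ≤ n)
    else r.1

-- ===== PRECONDITION & SPEC =====
-- Pre_ excludes exactly n < 0, where both A and B raise ValueError (trimming all positive
-- bit-widths still leaves sum 0 ≠ n).
def Pre_normalize_grouping (grouping : List Int) (n : Int) : Prop := 0 ≤ n
instance (grouping : List Int) (n : Int) : Decidable (Pre_normalize_grouping grouping n) := by unfold Pre_normalize_grouping; infer_instance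
def pvWitness_normalize_grouping : List Int × Int := ([3, 2], 4)

def Spec_normalize_grouping (grouping : List Int) (n : Int) (out : List Int) : Prop := out = normalize_grouping_alt grouping n
instance (grouping : List Int) (n : Int) (out : List Int) : Decidable (Spec_normalize_grouping grouping n out) := by unfold Spec_normalize_grouping; infer_instance

-- ===== CLAIM (what is proved, stated in full; the proofs are below) =====
def Claim_equal_normalize_grouping : Prop := ∀ (grouping : List Int) (n : Int), Dom_normalize_grouping grouping n → Pre_normalize_grouping grouping n → Spec_normalize_grouping grouping n (normalize_grouping grouping n)

-- ===== LEMMAS AND PROOFS =====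

-- Common characterisation: the unique prefix of g that sums to m, with boundary element trimmed.
def trimTo : List Int → Int → List Int
  | [], _ => []
  | x :: r, m => if m ≤ 0 then [] else if x ≤ m then x :: trimTo r (m - x) else [m]

theorem trimTo_self {g : List Int} (hpos : ∀ x ∈ g, 0 < x) : trimTo g g.sum = g := by
  induction g with
  | nil => rfl
  | cons x r ih =>
    have hx : 0 < x := hpos x (by simp)
    have hr : ∀ y ∈ r, 0 < y := fun y hy => hpos y (by simp [hy])
    have hrs : 0 ≤ r.sum := List.sum_nonneg (fun y hy => le_of_lt (hr y hy))
    simp only [List.sum_cons, trimTo]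
    rw [if_neg (by omega), if_pos (by omega)]
    simp [ih hr]

theorem trimTo_append_le {ys : List Int} {y m : Int}
    (hpos : ∀ x ∈ ys, 0 < x) (h0 : 0 ≤ m) (hle : m ≤ ys.sum) :
    trimTo (ys ++ [y]) m = trimTo ys m := by
  induction ys generalizing m with
  | nil =>
    have : m = 0 := by simpa using le_antisymm hle h0
    simp [this, trimTo]
  | cons x r ih =>
    have hr : ∀ z ∈ r, 0 < z := fun z hz => hpos z (by simp [hz])
    simp only [List.cons_append, trimTo]
    by_cases hm : m ≤ 0
    · simp [hm]
    · rw [if_neg hm, if_neg hm]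
      by_cases hxm : x ≤ m
      · rw [if_pos hxm, if_pos hxm, ih hr (by omega) (by simp only [List.sum_cons] at hle; omega)]
      · rw [if_neg hxm, if_neg hxm]

theorem trimTo_append_lt {ys : List Int} {y t : Int}
    (hpos : ∀ x ∈ ys, 0 < x) (ht0 : 0 < t) (hty : t < y) :
    trimTo (ys ++ [y]) (ys.sum + t) = ys ++ [t] := by
  induction ys with
  | nil =>
    simp only [List.nil_append, List.sum_nil, zero_add, trimTo]
    rw [if_neg (by omega), if_neg (by omega)]
  | cons x r ih =>
    have hx : 0 < x := hpos x (by simp)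
    have hr : ∀ z ∈ r, 0 < z := fun z hz => hpos z (by simp [hz])
    have hrs : 0 ≤ r.sum := List.sum_nonneg (fun z hz => le_of_lt (hr z hz))
    simp only [List.cons_append, trimTo, List.sum_cons]
    rw [if_neg (by omega), if_pos (by omega),
      show x + r.sum + t - x = r.sum + t from by ring, ih hr]

theorem trimTo_sum {g : List Int} {m : Int}
    (hpos : ∀ x ∈ g, 0 < x) (h0 : 0 ≤ m) (hle : m ≤ g.sum) : (trimTo g m).sum = m := by
  induction g generalizing m with
  | nil =>
    simp only [List.sum_nil] at hle
    simp [trimTo]; omega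
  | cons x r ih =>
    have hr : ∀ z ∈ r, 0 < z := fun z hz => hpos z (by simp [hz])
    simp only [trimTo]
    by_cases hm : m ≤ 0
    · rw [if_pos hm]; simp only [List.sum_nil]; omega
    · rw [if_neg hm]
      by_cases hxm : x ≤ m
      · rw [if_pos hxm]
        simp only [List.sum_cons]
        rw [ih hr (by omega) (by simp only [List.sum_cons] at hle; omega)]
        ring
      · rw [if_neg hxm]; simp

theorem getD_last {ys : List Int} {y : Int} : (ys ++ [y]).getD ys.length 0 = y := by
  induction ys with
  | nil => rfl
  | cons x r ih => simpa using ih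

theorem set_last {ys : List Int} {y v : Int} : (ys ++ [y]).set ys.length v = ys ++ [v] := by
  induction ys with
  | nil => rfl
  | cons x r ih => simp [List.set, ih]

theorem eraseIdx_last {ys : List Int} {y : Int} : (ys ++ [y]).eraseIdx ys.length = ys := by
  induction ys with
  | nil => rfl
  | cons x r ih => simp [List.eraseIdx, ih]

theorem loopA_nonpos {g : List Int} {e : Int} {k : Nat} (he : ¬ e > 0) : loopA g e k = g := by
  cases k <;> simp [loopA, he]

theorem loopA_eq {g : List Int} {e : Int}
    (hpos : ∀ x ∈ g, 0 < x) (h0 : 0 ≤ e) (hle : e ≤ g.sum) :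
    loopA g e g.length = trimTo g (g.sum - e) := by
  induction g using List.reverseRecOn generalizing e with
  | nil =>
    simp only [List.sum_nil] at hle
    simp [loopA, trimTo]
  | append_singleton ys y ih =>
    have hy : 0 < y := hpos y (by simp)
    have hys : ∀ x ∈ ys, 0 < x := fun x hx => hpos x (by simp [hx])
    have hyss : 0 ≤ ys.sum := List.sum_nonneg (fun z hz => le_of_lt (hys z hz))
    have hsum : (ys ++ [y]).sum = ys.sum + y := by simp
    rw [hsum] at hle
    by_cases he : e > 0
    · rw [show (ys ++ [y]).length = ys.length + 1 from by simp]
      simp only [loopA, if_pos he, getD_last, set_last]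
      by_cases hce : y ≤ e
      · rw [show min y e = y from by omega, if_pos (by ring), eraseIdx_last,
          ih hys (by omega) (by omega), hsum]
        rw [trimTo_append_le hys (by omega) (by omega)]
        congr 1; ring
      · rw [show min y e = e from by omega, if_neg (by omega), loopA_nonpos (by omega), hsum,
          show ys.sum + y - e = ys.sum + (y - e) from by ring,
          trimTo_append_lt hys (by omega) (by omega)]
    · rw [loopA_nonpos he, show e = 0 from by omega, sub_zero, trimTo_self hpos]

theorem loopB_eq {n : Int} (g : List Int) (acc : Int) :
    loopB g acc n = (trimTo g (n - acc), acc + (trimTo g (n - acc)).sum) := by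
  induction g generalizing acc with
  | nil => simp [loopB, trimTo]
  | cons x r ih =>
    by_cases hacc : acc ≥ n
    · simp only [loopB, trimTo, if_pos hacc, if_pos (show n - acc ≤ 0 from by omega)]
      simp
    · have hm : ¬ (n - acc ≤ 0) := by omega
      by_cases hx : x ≤ n - acc
      · simp only [loopB, trimTo, if_neg hacc, if_neg hm, if_pos hx, ih (acc + x)]
        rw [show n - (acc + x) = n - acc - x from by ring]
        simp only [List.sum_cons, Prod.mk.injEq, true_and]
        ring
      · simp only [loopB, trimTo, if_neg hacc, if_neg hm, if_neg hx]
        simp only [Prod.mk.injEq, true_and, List.sum_cons, List.sum_nil]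
        ring

theorem filter_pos_pos (grouping : List Int) :
    ∀ x ∈ grouping.filter (fun x => decide (0 < x)), 0 < x := by
  intro x hx
  have := List.of_mem_filter hx
  simpa using this

-- ===== VERDICT (by name: the statement is the Claim_ definition above) =====
theorem normalize_grouping_spec : Claim_equal_normalize_grouping := by
  intro grouping n _ hpre
  unfold Pre_normalize_grouping at hpre
  unfold Spec_normalize_grouping normalize_grouping normalize_grouping_alt
  set g := grouping.filter (fun x => decide (0 < x)) with hg
  have hpos : ∀ x ∈ g, 0 < x := filter_pos_pos grouping
  by_cases h1 : g.sum < n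
  · simp [h1]
  · rw [if_neg h1, if_neg h1]
    by_cases h2 : g.sum > n
    · rw [if_pos h2, if_neg (show ¬ g.sum = n from by omega)]
      have hA : loopA g (g.sum - n) g.length = trimTo g n := by
        rw [loopA_eq hpos (by omega) (by omega)]
        congr 1; ring
      have hB : loopB g 0 n = (trimTo g n, (trimTo g n).sum) := by
        rw [loopB_eq g 0]; simp
      have hsum : (trimTo g n).sum = n := trimTo_sum hpos hpre (by omega)
      simp [hA, hB, hsum]
    · rw [if_neg h2, if_pos (show g.sum = n from by omega)]
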